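-- pv_equiv track=rewrite | github.com/cnguyen-uk/Advent-of-Code-2020 | Solutions/Day 6/solution.py | group_size
-- ===== SOURCE A (Python) =====
-- def group_size(input_list):
--     """Return the number of people per group from the input_list."""
--     headcount_list = []
--     count = 0
--     for line in input_list:
--         if line != "":
--             count += 1
--         else:
--             headcount_list.append(count)
--             count = 0
--     return headcount_list
-- ===== SOURCE B (Python) =====
-- def group_size(input_list):
--     """Return the number of people per group from the input_list."""
--     blanks = [i for i, line in enumerate(input_list) if line == ""]
--     headcount_list = []
--     prev = -1
--     for p in blanks:
--         headcount_list.append(p - prev - 1)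
--         prev = p
--     return headcount_list
-- ===== Notes on version B (the rewrite author's own statement) =====
-- stated objective: alternative
-- what changed: B derives each group's headcount from the positions of blank-line separators (gap = p - prev - 1 between consecutive blank indices, prev starting at -1) instead of accumulating a running counter per line; like A it emits nothing for a trailing unterminated group.
import Mathlib
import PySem

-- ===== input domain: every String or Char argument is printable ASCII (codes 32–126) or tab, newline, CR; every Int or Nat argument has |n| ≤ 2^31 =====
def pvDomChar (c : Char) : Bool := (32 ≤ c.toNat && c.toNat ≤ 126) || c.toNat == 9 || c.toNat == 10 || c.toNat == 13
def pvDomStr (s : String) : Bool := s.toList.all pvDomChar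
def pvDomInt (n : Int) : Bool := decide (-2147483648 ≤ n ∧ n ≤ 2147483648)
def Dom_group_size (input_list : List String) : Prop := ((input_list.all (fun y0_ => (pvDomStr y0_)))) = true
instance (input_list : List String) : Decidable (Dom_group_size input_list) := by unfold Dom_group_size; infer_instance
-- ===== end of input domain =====

-- B computes headcounts from the indices of blank-line separators (gaps between
-- consecutive blank positions) instead of A's running per-line counter; same values.


-- ===== PORT A =====
-- loop over lines with state (headcount_list, count)
def group_size (input_list : List String) : List Int :=
  (input_list.foldl
    (fun (st : List Int × Int) line =>
      if line ≠ "" then (st.1, st.2 + 1) else (st.1 ++ [st.2], 0))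
    ([], 0)).1

-- ===== PORT B =====
-- blanks = [i for i, line in enumerate(input_list) if line == ""]
def group_size_alt (input_list : List String) : List Int :=
  ((((PySem.List.enumerate input_list).filter (fun p => p.2 == "")).map (fun p => p.1)).foldl
    (fun (st : List Int × Int) p => (st.1 ++ [p - st.2 - 1], p))
    ([], -1)).1

-- ===== PRECONDITION & SPEC =====
def Spec_group_size (input_list : List String) (out : List Int) : Prop := out = group_size_alt input_list
instance (input_list : List String) (out : List Int) : Decidable (Spec_group_size input_list out) := by unfold Spec_group_size; infer_instance

-- ===== CLAIM (what is proved, stated in full; the proofs are below) =====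
def Claim_equal_group_size : Prop := ∀ (input_list : List String), Dom_group_size input_list → Spec_group_size input_list (group_size input_list)

-- ===== LEMMAS AND PROOFS =====

-- the sequence of emitted counts of A's loop, counter started at c
def gsBody : List String → Int → List Int
  | [], _ => []
  | x :: xs, c => if x ≠ "" then gsBody xs (c + 1) else c :: gsBody xs 0

-- the gaps between consecutive blank indices, previous index prev
def gsGaps : Int → List Int → List Int
  | _, [] => []
  | prev, p :: rest => (p - prev - 1) :: gsGaps p rest

theorem gsA_fold (l : List String) (acc : List Int) (c : Int) :
    (l.foldl
      (fun (st : List Int × Int) line =>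
        if line ≠ "" then (st.1, st.2 + 1) else (st.1 ++ [st.2], 0))
      (acc, c)).1 = acc ++ gsBody l c := by
  induction l generalizing acc c with
  | nil => simp [gsBody]
  | cons x xs ih =>
    by_cases h : x = ""
    · simpa [gsBody, h] using ih (acc ++ [c]) 0
    · simpa [gsBody, h] using ih acc (c + 1)

theorem gsB_fold (bl : List Int) (acc : List Int) (prev : Int) :
    (bl.foldl
      (fun (st : List Int × Int) p => (st.1 ++ [p - st.2 - 1], p))
      (acc, prev)).1 = acc ++ gsGaps prev bl := by
  induction bl generalizing acc prev with
  | nil => simp [gsGaps]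
  | cons p rest ih => simp [gsGaps, ih]

theorem gsMain (l : List String) (i : Int) (c : Int) :
    gsGaps (i - c - 1)
      (((PySem.List.enumerate l i).filter (fun p => p.2 == "")).map (fun p => p.1))
      = gsBody l c := by
  induction l generalizing i c with
  | nil => simp [PySem.List.enumerate_nil, gsGaps, gsBody]
  | cons x xs ih =>
    by_cases h : x = ""
    · have h1 := ih (i + 1) 0
      rw [show i + 1 - (0 : Int) - 1 = i by ring] at h1
      simp [h, PySem.List.enumerate_cons, gsBody, gsGaps, h1,
        show i - (i - c - 1) - 1 = c by ring]
    · have h1 := ih (i + 1) (c + 1)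
      rw [show i + 1 - (c + 1) - 1 = i - c - 1 by ring] at h1
      simp [h, PySem.List.enumerate_cons, gsBody, h1]

-- ===== VERDICT (by name: the statement is the Claim_ definition above) =====
theorem group_size_spec : Claim_equal_group_size := by
  intro l _
  show group_size l = group_size_alt l
  have hm := gsMain l 0 0
  rw [show (0 : Int) - 0 - 1 = -1 by ring] at hm
  rw [group_size, group_size_alt, gsA_fold, gsB_fold, List.nil_append, List.nil_append, hm]
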